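-- pv_equiv track=rewrite | github.com/Kymi808/music-composition-ai | composer/theory/harmony.py | check_parallel_fifths
-- ===== SOURCE A (Python) =====
-- def check_parallel_fifths(
--
--     prev_notes: list[int],
--     curr_notes: list[int],
-- ) -> bool:
--     """Check if there are parallel fifths between two voicings.
--
--     Returns True if parallel fifths exist (which is usually undesirable).
--     """
--     if len(prev_notes) < 2 or len(curr_notes) < 2:
--         return False
--
--     for i in range(len(prev_notes)):
--         for j in range(i + 1, len(prev_notes)):
--             if i >= len(curr_notes) or j >= len(curr_notes):
--                 continue
--             prev_interval = abs(prev_notes[j] - prev_notes[i]) % 12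
--             curr_interval = abs(curr_notes[j] - curr_notes[i]) % 12
--
--             # Both are perfect fifths and both voices moved
--             if (prev_interval == 7 and curr_interval == 7
--                     and prev_notes[i] != curr_notes[i]
--                     and prev_notes[j] != curr_notes[j]):
--                 return True
--     return False
-- ===== SOURCE B (Python) =====
-- def check_parallel_fifths(
--     prev_notes: list[int],
--     curr_notes: list[int],
-- ) -> bool:
--     """Check if there are parallel fifths between two voicings.
--
--     Sort the moved voices by previous pitch and sweep once: for each voice,
--     a partner forming parallel fifths among the already-swept (lower prev
--     pitch) voices is detected from per-residue-bucket min/max current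
--     pitches, so the quadratic pair scan disappears.
--     """
--     moved = [(p, c) for p, c in zip(prev_notes, curr_notes) if p != c]
--     moved.sort(key=lambda pc: pc[0])
--     lo = {}
--     hi = {}
--     for p, c in moved:
--         base = (p - 7) % 12
--         kl = (base, (c - 7) % 12)
--         if kl in lo and lo[kl] < c:
--             return True
--         kh = (base, (c + 7) % 12)
--         if kh in hi and hi[kh] > c:
--             return True
--         k = (p % 12, c % 12)
--         if k not in lo or c < lo[k]:
--             lo[k] = c
--         if k not in hi or c > hi[k]:
--             hi[k] = c
--     return False
-- ===== Notes on version B (the rewrite author's own statement) =====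
-- stated objective: faster
-- what changed: A's nested scan over all voice pairs is replaced by filtering the moved voices, sorting them by previous pitch and sweeping once, detecting a parallel-fifth partner via per-residue-pair-bucket min/max current pitches.
import Mathlib
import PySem

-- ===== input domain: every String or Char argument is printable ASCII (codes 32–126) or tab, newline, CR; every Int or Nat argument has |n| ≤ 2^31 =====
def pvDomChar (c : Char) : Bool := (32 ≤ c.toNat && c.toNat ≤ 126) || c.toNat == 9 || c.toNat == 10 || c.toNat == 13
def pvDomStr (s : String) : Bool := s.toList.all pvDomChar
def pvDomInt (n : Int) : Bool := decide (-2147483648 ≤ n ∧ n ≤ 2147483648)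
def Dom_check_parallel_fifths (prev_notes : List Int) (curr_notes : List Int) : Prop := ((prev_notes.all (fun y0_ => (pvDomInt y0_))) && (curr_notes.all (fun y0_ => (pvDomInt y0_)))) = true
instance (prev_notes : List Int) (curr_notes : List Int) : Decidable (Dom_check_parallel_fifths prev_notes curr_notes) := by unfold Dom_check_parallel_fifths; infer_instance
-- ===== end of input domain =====

-- B replaces A's quadratic scan over all voice pairs by sorting the moved voices by previous
-- pitch and sweeping once with per-residue-bucket min/max current pitches (objective: faster).


-- ===== PORT A =====
-- Literal port of A: guard on the lengths, then the nested index loops over all pairs i < j.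
-- The indices fed to pyGetD are always in range (0 ≤ i < j < min length), so pyGetD is exact
-- for Python's xs[i] here.
def check_parallel_fifths (prev_notes : List Int) (curr_notes : List Int) : Bool :=
  if prev_notes.length < 2 || curr_notes.length < 2 then false
  else
    (PySem.List.pyRange 0 (prev_notes.length : Int) 1).any fun i =>
      (PySem.List.pyRange (i + 1) (prev_notes.length : Int) 1).any fun j =>
        if ((curr_notes.length : Int) ≤ i || (curr_notes.length : Int) ≤ j) then false
        else
          let prev_interval := PySem.Int.mod |PySem.List.pyGetD prev_notes j 0 - PySem.List.pyGetD prev_notes i 0| 12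
          let curr_interval := PySem.Int.mod |PySem.List.pyGetD curr_notes j 0 - PySem.List.pyGetD curr_notes i 0| 12
          prev_interval == 7 && curr_interval == 7 &&
            PySem.List.pyGetD prev_notes i 0 != PySem.List.pyGetD curr_notes i 0 &&
            PySem.List.pyGetD prev_notes j 0 != PySem.List.pyGetD curr_notes j 0

-- ===== PORT B =====
-- The sweep loop of Source B: `lo`/`hi` map a residue pair (p % 12, c % 12) to the min/max current
-- pitch seen so far; `kl in lo and lo[kl] < c` is the match on the lo.get? option.
def cpfLoop (l : List (Int × Int)) (lo hi : PySem.Dict (Int × Int) Int) : Bool :=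
  match l with
  | [] => false
  | (p, c) :: rest =>
    let base := PySem.Int.mod (p - 7) 12
    let kl := (base, PySem.Int.mod (c - 7) 12)
    let hit1 : Bool := match lo.get? kl with | some v => decide (v < c) | none => false
    if hit1 then true
    else
      let kh := (base, PySem.Int.mod (c + 7) 12)
      let hit2 : Bool := match hi.get? kh with | some v => decide (c < v) | none => false
      if hit2 then true
      else
        let k := (PySem.Int.mod p 12, PySem.Int.mod c 12)
        let lo' := match lo.get? k with
          | none => lo.insert k c
          | some v => if c < v then lo.insert k c else lo
        let hi' := match hi.get? k with
          | none => hi.insert k c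
          | some v => if v < c then hi.insert k c else hi
        cpfLoop rest lo' hi'

def check_parallel_fifths_alt (prev_notes : List Int) (curr_notes : List Int) : Bool :=
  let moved := (prev_notes.zip curr_notes).filter (fun pc => pc.1 != pc.2)
  let sortedMoved := PySem.List.sorted moved (fun pc => pc.1) false
  cpfLoop sortedMoved PySem.Dict.empty PySem.Dict.empty

-- ===== PRECONDITION & SPEC =====
def Spec_check_parallel_fifths (prev_notes : List Int) (curr_notes : List Int) (out : Bool) : Prop := out = check_parallel_fifths_alt prev_notes curr_notes
instance (prev_notes : List Int) (curr_notes : List Int) (out : Bool) : Decidable (Spec_check_parallel_fifths prev_notes curr_notes out) := by unfold Spec_check_parallel_fifths; infer_instance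

-- ===== CLAIM (what is proved, stated in full; the proofs are below) =====
def Claim_equal_check_parallel_fifths : Prop := ∀ (prev_notes : List Int) (curr_notes : List Int), Dom_check_parallel_fifths prev_notes curr_notes → Spec_check_parallel_fifths prev_notes curr_notes (check_parallel_fifths prev_notes curr_notes)

-- ===== LEMMAS AND PROOFS =====

-- residue-pair key of a moved voice
def cpfKey (a : Int × Int) : Int × Int := (PySem.Int.mod a.1 12, PySem.Int.mod a.2 12)

-- "the voices a and b form parallel fifths": exactly the condition of A's inner test
def cpfGood (a b : Int × Int) : Prop :=
  PySem.Int.mod |b.1 - a.1| 12 = 7 ∧ PySem.Int.mod |b.2 - a.2| 12 = 7 ∧ a.1 ≠ a.2 ∧ b.1 ≠ b.2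

def CpfBad (l : List (Int × Int)) : Prop := ∃ a ∈ l, ∃ b ∈ l, cpfGood a b

def CpfBad2 (l : List (Int × Int)) : Prop := ∃ a b, [a, b].Sublist l ∧ cpfGood a b

-- generic min/max bucket invariant: r y z = "y strictly beats z"; the dict stores, per key,
-- a value of some past element that no past element of that key beats
def cpfInv (r : Int → Int → Bool) (P : Int × Int → Prop) (d : PySem.Dict (Int × Int) Int) : Prop :=
  ∀ k : Int × Int,
    (d.get? k = none → ∀ a, P a → cpfKey a ≠ k) ∧
    (∀ v, d.get? k = some v →
      (∃ a, P a ∧ cpfKey a = k ∧ a.2 = v) ∧ ∀ a, P a → cpfKey a = k → r a.2 v = false)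

lemma cpfGood_symm {a b : Int × Int} (h : cpfGood a b) : cpfGood b a := by
  obtain ⟨h1, h2, h3, h4⟩ := h
  exact ⟨by rwa [abs_sub_comm], by rwa [abs_sub_comm], h4, h3⟩

lemma cpfGood_ne_fst {a b : Int × Int} (h : cpfGood a b) : a.1 ≠ b.1 := by
  intro he
  have h1 : PySem.Int.mod |b.1 - a.1| 12 = 7 := h.1
  rw [he, show |b.1 - b.1| = 0 by simp] at h1
  norm_num [PySem.Int.mod] at h1

lemma cpfInv_empty (r : Int → Int → Bool) : cpfInv r (fun _ => False) PySem.Dict.empty := by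
  intro k
  constructor
  · intro _ a ha; exact absurd ha (by simp)
  · intro v hv; rw [PySem.Dict.get?_empty] at hv; cases hv

lemma cpfMod7_of_le (u v : Int) (_ : u ≤ v) :
    PySem.Int.mod (v - u) 12 = 7 ↔ PySem.Int.mod u 12 = PySem.Int.mod (v - 7) 12 := by
  simp only [PySem.Int.mod_eq_emod_of_pos (show (0:Int) < 12 by norm_num)]
  omega
lemma cpfMod7_abs (u v : Int) :
    PySem.Int.mod |v - u| 12 = 7 ↔
      (u < v ∧ PySem.Int.mod u 12 = PySem.Int.mod (v - 7) 12) ∨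
      (v < u ∧ PySem.Int.mod u 12 = PySem.Int.mod (v + 7) 12) := by
  simp only [PySem.Int.mod_eq_emod_of_pos (show (0:Int) < 12 by norm_num)]
  rcases le_total u v with h | h
  · rw [abs_of_nonneg (by omega)]; omega
  · rw [abs_of_nonpos (by omega)]; omega

lemma cpfGood_char (a x : Int × Int) (hax : a.1 ≤ x.1) (ham : a.1 ≠ a.2) (hxm : x.1 ≠ x.2) :
    cpfGood a x ↔
      (cpfKey a = (PySem.Int.mod (x.1 - 7) 12, PySem.Int.mod (x.2 - 7) 12) ∧ a.2 < x.2) ∨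
      (cpfKey a = (PySem.Int.mod (x.1 - 7) 12, PySem.Int.mod (x.2 + 7) 12) ∧ x.2 < a.2) := by
  unfold cpfGood cpfKey
  rw [abs_of_nonneg (by omega : (0:Int) ≤ x.1 - a.1), cpfMod7_of_le _ _ hax, cpfMod7_abs]
  simp only [Prod.mk.injEq]
  constructor
  · rintro ⟨h1, h2 | h2, _, _⟩
    · exact Or.inl ⟨⟨h1, h2.2⟩, h2.1⟩
    · exact Or.inr ⟨⟨h1, h2.2⟩, h2.1⟩
  · rintro (⟨⟨h1, h2⟩, h3⟩ | ⟨⟨h1, h2⟩, h3⟩)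
    · exact ⟨h1, Or.inl ⟨h3, h2⟩, ham, hxm⟩
    · exact ⟨h1, Or.inr ⟨h3, h2⟩, ham, hxm⟩

lemma cpfInv_hit {r : Int → Int → Bool} {P : Int × Int → Prop} {d : PySem.Dict (Int × Int) Int}
    (h : cpfInv r P d) (k : Int × Int) (c : Int)
    (hcomp : ∀ a v : Int, r a c = true → r a v = false → r v c = true) :
    (match d.get? k with | some v => r v c | none => false) = true ↔
      ∃ a, P a ∧ cpfKey a = k ∧ r a.2 c = true := by
  cases hd : d.get? k with
  | none =>
    simp only []
    constructor
    · intro hf; cases hf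
    · rintro ⟨a, hPa, hk, _⟩; exact absurd hk ((h k).1 hd a hPa)
  | some v =>
    simp only []
    constructor
    · intro hrv
      obtain ⟨⟨a, hPa, hk, hav⟩, _⟩ := (h k).2 v hd
      exact ⟨a, hPa, hk, by rwa [hav]⟩
    · rintro ⟨a, hPa, hk, hrc⟩
      obtain ⟨_, hbound⟩ := (h k).2 v hd
      exact hcomp a.2 v hrc (hbound a hPa hk)

lemma cpfInv_ins {r : Int → Int → Bool} {P : Int × Int → Prop} {d : PySem.Dict (Int × Int) Int}
    (h : cpfInv r P d) (x : Int × Int)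
    (hrefl : r x.2 x.2 = false)
    (hbnd : ∀ a, P a → cpfKey a = cpfKey x → r a.2 x.2 = false) :
    cpfInv r (fun a => P a ∨ a = x) (d.insert (cpfKey x) x.2) := by
  intro k
  rw [PySem.Dict.get?_insert]
  by_cases hk : k = cpfKey x
  · subst hk
    rw [if_pos rfl]
    refine ⟨fun hn => by simp at hn, fun v hv => ?_⟩
    injection hv with hv; subst hv
    refine ⟨⟨x, Or.inr rfl, rfl, rfl⟩, ?_⟩
    rintro a (hPa | rfl) hka
    · exact hbnd a hPa hka
    · exact hrefl
  · rw [if_neg hk]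
    refine ⟨?_, ?_⟩
    · rintro hn a (hPa | rfl) hka
      · exact (h k).1 hn a hPa hka
      · exact hk hka.symm
    · intro v hv
      obtain ⟨⟨a, hPa, hka, hav⟩, hbound⟩ := (h k).2 v hv
      refine ⟨⟨a, Or.inl hPa, hka, hav⟩, ?_⟩
      rintro b (hPb | rfl) hkb
      · exact hbound b hPb hkb
      · exact absurd hkb.symm hk

lemma cpfInv_keep {r : Int → Int → Bool} {P : Int × Int → Prop} {d : PySem.Dict (Int × Int) Int}
    (h : cpfInv r P d) (x : Int × Int)
    (hx : ∃ w, d.get? (cpfKey x) = some w ∧ r x.2 w = false) :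
    cpfInv r (fun a => P a ∨ a = x) d := by
  intro k
  refine ⟨?_, ?_⟩
  · rintro hn a (hPa | rfl) hka
    · exact (h k).1 hn a hPa hka
    · obtain ⟨w, hw, _⟩ := hx
      rw [hka] at hw; rw [hn] at hw; cases hw
  · intro v hv
    obtain ⟨⟨a, hPa, hka, hav⟩, hbound⟩ := (h k).2 v hv
    refine ⟨⟨a, Or.inl hPa, hka, hav⟩, ?_⟩
    rintro b (hPb | rfl) hkb
    · exact hbound b hPb hkb
    · obtain ⟨w, hw, hrw⟩ := hx
      rw [hkb] at hw; rw [hv] at hw; injection hw with hw; rwa [hw]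

lemma cpfInv_step {r : Int → Int → Bool} {P : Int × Int → Prop} {d : PySem.Dict (Int × Int) Int}
    (h : cpfInv r P d) (x : Int × Int)
    (hrefl : r x.2 x.2 = false)
    (hkeep : ∀ a c v : Int, r c v = true → r a v = false → r a c = false) :
    cpfInv r (fun a => P a ∨ a = x)
      (match d.get? (cpfKey x) with
       | none => d.insert (cpfKey x) x.2
       | some v => if r x.2 v then d.insert (cpfKey x) x.2 else d) := by
  cases hd : d.get? (cpfKey x) with
  | none =>
    exact cpfInv_ins h x hrefl (fun a hPa hka => absurd hka ((h _).1 hd a hPa))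
  | some w =>
    rw [show (match some w with
       | none => d.insert (cpfKey x) x.2
       | some v => if r x.2 v = true then d.insert (cpfKey x) x.2 else d) =
        if r x.2 w = true then d.insert (cpfKey x) x.2 else d from rfl]
    by_cases hins : r x.2 w = true
    · rw [if_pos hins]
      exact cpfInv_ins h x hrefl
        (fun a hPa hka => hkeep a.2 x.2 w hins (((h _).2 w hd).2 a hPa hka))
    · rw [if_neg hins]
      exact cpfInv_keep h x ⟨w, hd, Bool.eq_false_iff.mpr hins⟩

lemma cpfBad2_cons (x : Int × Int) (r : List (Int × Int)) :
    CpfBad2 (x :: r) ↔ (∃ b ∈ r, cpfGood x b) ∨ CpfBad2 r := by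
  constructor
  · rintro ⟨a, b, hsub, hg⟩
    cases hsub with
    | cons _ h' => exact Or.inr ⟨a, b, h', hg⟩
    | cons₂ _ h' => exact Or.inl ⟨b, List.singleton_sublist.mp h', hg⟩
  · rintro (⟨b, hb, hg⟩ | ⟨a, b, hsub, hg⟩)
    · exact ⟨x, b, List.Sublist.cons₂ x (List.singleton_sublist.mpr hb), hg⟩
    · exact ⟨a, b, hsub.trans (List.sublist_cons_self x r), hg⟩

lemma cpfLoop_iff (l : List (Int × Int)) (P : Int × Int → Prop)
    (lo hi : PySem.Dict (Int × Int) Int)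
    (hmov : ∀ x ∈ l, x.1 ≠ x.2)
    (hsort : l.Pairwise (fun a b => a.1 ≤ b.1))
    (hPmov : ∀ a, P a → a.1 ≠ a.2)
    (hPle : ∀ a, P a → ∀ b ∈ l, a.1 ≤ b.1)
    (hlo : cpfInv (fun y z => decide (y < z)) P lo)
    (hhi : cpfInv (fun y z => decide (z < y)) P hi) :
    cpfLoop l lo hi = true ↔ (∃ b ∈ l, ∃ a, P a ∧ cpfGood a b) ∨ CpfBad2 l := by
  induction l generalizing P lo hi with
  | nil =>
    simp only [cpfLoop, CpfBad2]
    constructor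
    · intro h; cases h
    · rintro (⟨b, hb, _⟩ | ⟨a, b, hsub, _⟩)
      · cases hb
      · simp at hsub
  | cons x rest ih =>
    obtain ⟨p, c⟩ := x
    have hxm : (p, c).1 ≠ (p, c).2 := hmov _ (List.mem_cons_self)
    have hchar : ∀ a, P a → (cpfGood a (p, c) ↔
        (cpfKey a = (PySem.Int.mod (p - 7) 12, PySem.Int.mod (c - 7) 12) ∧ a.2 < c) ∨
        (cpfKey a = (PySem.Int.mod (p - 7) 12, PySem.Int.mod (c + 7) 12) ∧ c < a.2)) := by
      intro a hPa
      exact cpfGood_char a (p, c) (hPle a hPa _ List.mem_cons_self) (hPmov a hPa) hxm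
    have hhit1 : (match lo.get? (PySem.Int.mod (p - 7) 12, PySem.Int.mod (c - 7) 12) with
        | some v => decide (v < c) | none => false) = true ↔
        ∃ a, P a ∧ cpfKey a = (PySem.Int.mod (p - 7) 12, PySem.Int.mod (c - 7) 12) ∧
          decide (a.2 < c) = true :=
      cpfInv_hit hlo _ c (by intro a v h1 h2; simp at *; omega)
    have hhit2 : (match hi.get? (PySem.Int.mod (p - 7) 12, PySem.Int.mod (c + 7) 12) with
        | some v => decide (c < v) | none => false) = true ↔
        ∃ a, P a ∧ cpfKey a = (PySem.Int.mod (p - 7) 12, PySem.Int.mod (c + 7) 12) ∧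
          decide (c < a.2) = true :=
      cpfInv_hit hhi _ c (by intro a v h1 h2; simp at *; omega)
    rw [show cpfLoop ((p, c) :: rest) lo hi =
      (if (match lo.get? (PySem.Int.mod (p - 7) 12, PySem.Int.mod (c - 7) 12) with
            | some v => decide (v < c) | none => false) then true
       else if (match hi.get? (PySem.Int.mod (p - 7) 12, PySem.Int.mod (c + 7) 12) with
            | some v => decide (c < v) | none => false) then true
       else cpfLoop rest
         (match lo.get? (PySem.Int.mod p 12, PySem.Int.mod c 12) with
          | none => lo.insert (PySem.Int.mod p 12, PySem.Int.mod c 12) c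
          | some v => if c < v then lo.insert (PySem.Int.mod p 12, PySem.Int.mod c 12) c else lo)
         (match hi.get? (PySem.Int.mod p 12, PySem.Int.mod c 12) with
          | none => hi.insert (PySem.Int.mod p 12, PySem.Int.mod c 12) c
          | some v => if v < c then hi.insert (PySem.Int.mod p 12, PySem.Int.mod c 12) c else hi)) from rfl]
    by_cases h1 : (match lo.get? (PySem.Int.mod (p - 7) 12, PySem.Int.mod (c - 7) 12) with
        | some v => decide (v < c) | none => false) = true
    · rw [if_pos h1]
      obtain ⟨a, hPa, hka, hlt⟩ := hhit1.mp h1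
      simp only [true_iff]
      exact Or.inl ⟨(p, c), List.mem_cons_self, a, hPa,
        (hchar a hPa).mpr (Or.inl ⟨hka, by simpa using hlt⟩)⟩
    · rw [if_neg h1]
      by_cases h2 : (match hi.get? (PySem.Int.mod (p - 7) 12, PySem.Int.mod (c + 7) 12) with
          | some v => decide (c < v) | none => false) = true
      · rw [if_pos h2]
        obtain ⟨a, hPa, hka, hlt⟩ := hhit2.mp h2
        simp only [true_iff]
        exact Or.inl ⟨(p, c), List.mem_cons_self, a, hPa,
          (hchar a hPa).mpr (Or.inr ⟨hka, by simpa using hlt⟩)⟩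
      · rw [if_neg h2]
        have hnx : ¬ ∃ a, P a ∧ cpfGood a (p, c) := by
          rintro ⟨a, hPa, hg⟩
          rcases (hchar a hPa).mp hg with ⟨hka, hlt⟩ | ⟨hka, hlt⟩
          · exact h1 (hhit1.mpr ⟨a, hPa, hka, by simpa using hlt⟩)
          · exact h2 (hhit2.mpr ⟨a, hPa, hka, by simpa using hlt⟩)
        have hlo' := cpfInv_step hlo (p, c) (by simp)
          (by intro a cc v hv hf; simp at *; omega)
        have hhi' := cpfInv_step hhi (p, c) (by simp)
          (by intro a cc v hv hf; simp at *; omega)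
        have hstep : (match lo.get? (PySem.Int.mod p 12, PySem.Int.mod c 12) with
            | none => lo.insert (PySem.Int.mod p 12, PySem.Int.mod c 12) c
            | some v => if c < v then lo.insert (PySem.Int.mod p 12, PySem.Int.mod c 12) c else lo)
            = (match lo.get? (cpfKey (p, c)) with
            | none => lo.insert (cpfKey (p, c)) (p, c).2
            | some v => if (fun y z => decide (y < z)) (p, c).2 v then lo.insert (cpfKey (p, c)) (p, c).2 else lo) := by
          simp [cpfKey]
        have hstep2 : (match hi.get? (PySem.Int.mod p 12, PySem.Int.mod c 12) with
            | none => hi.insert (PySem.Int.mod p 12, PySem.Int.mod c 12) c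
            | some v => if v < c then hi.insert (PySem.Int.mod p 12, PySem.Int.mod c 12) c else hi)
            = (match hi.get? (cpfKey (p, c)) with
            | none => hi.insert (cpfKey (p, c)) (p, c).2
            | some v => if (fun y z => decide (z < y)) (p, c).2 v then hi.insert (cpfKey (p, c)) (p, c).2 else hi) := by
          simp [cpfKey]
        rw [hstep, hstep2]
        rw [ih (fun a => P a ∨ a = (p, c)) _ _
          (fun y hy => hmov y (List.mem_cons_of_mem _ hy))
          (List.Pairwise.of_cons hsort)
          (by rintro a (hPa | rfl); exacts [hPmov a hPa, hxm])
          (by rintro a (hPa | rfl) b hb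
              · exact hPle a hPa b (List.mem_cons_of_mem _ hb)
              · exact (List.pairwise_cons.mp hsort).1 b hb)
          hlo' hhi']
        rw [cpfBad2_cons]
        constructor
        · rintro (⟨b, hb, a, (hPa | rfl), hg⟩ | hB)
          · exact Or.inl ⟨b, List.mem_cons_of_mem _ hb, a, hPa, hg⟩
          · exact Or.inr (Or.inl ⟨b, hb, hg⟩)
          · exact Or.inr (Or.inr hB)
        · rintro (⟨b, hb, a, hPa, hg⟩ | ⟨b, hb, hg⟩ | hB)
          · rcases List.mem_cons.mp hb with rfl | hb'
            · exact absurd ⟨a, hPa, hg⟩ hnx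
            · exact Or.inl ⟨b, hb', a, Or.inl hPa, hg⟩
          · exact Or.inl ⟨b, hb, (p, c), Or.inr rfl, hg⟩
          · exact Or.inr hB

lemma cpfPair_sublist {α : Type} {a b : α} {l : List α} (ha : a ∈ l) (hb : b ∈ l) (hne : a ≠ b) :
    [a, b].Sublist l ∨ [b, a].Sublist l := by
  induction l with
  | nil => cases ha
  | cons x t ih =>
    rcases List.mem_cons.mp ha with rfl | hat
    · have hbt : b ∈ t := by
        rcases List.mem_cons.mp hb with rfl | h
        · exact absurd rfl hne
        · exact h
      exact Or.inl (List.Sublist.cons₂ a (List.singleton_sublist.mpr hbt))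
    · rcases List.mem_cons.mp hb with rfl | hbt
      · exact Or.inr (List.Sublist.cons₂ b (List.singleton_sublist.mpr hat))
      · rcases ih hat hbt with h | h
        · exact Or.inl (h.cons x)
        · exact Or.inr (h.cons x)

lemma cpfBad2_iff_bad (l : List (Int × Int)) : CpfBad2 l ↔ CpfBad l := by
  constructor
  · rintro ⟨a, b, hsub, hg⟩
    exact ⟨a, hsub.subset (by simp), b, hsub.subset (by simp), hg⟩
  · rintro ⟨a, ha, b, hb, hg⟩
    have hne : a ≠ b := fun h => cpfGood_ne_fst hg (by rw [h])
    rcases cpfPair_sublist ha hb hne with h | h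
    · exact ⟨a, b, h, hg⟩
    · exact ⟨b, a, h, cpfGood_symm hg⟩

lemma cpfBad_A (prev_notes curr_notes : List Int) :
    check_parallel_fifths prev_notes curr_notes = true ↔ CpfBad (prev_notes.zip curr_notes) := by
  unfold check_parallel_fifths
  split_ifs with hg
  · simp only [false_iff]
    rintro ⟨a, ha, b, hb, hgood⟩
    have hne : a ≠ b := fun h => cpfGood_ne_fst hgood (by rw [h])
    have hlen : 2 ≤ (prev_notes.zip curr_notes).length := by
      rcases hzip : prev_notes.zip curr_notes with _ | ⟨u, _ | ⟨v, t⟩⟩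
      · rw [hzip] at ha; cases ha
      · rw [hzip] at ha hb
        simp at ha hb; exact absurd (ha.trans hb.symm) hne
      · simp
    rw [List.length_zip] at hlen
    simp at hg
    omega
  · simp only [Bool.or_eq_true, decide_eq_true_eq, not_or, not_lt] at hg
    obtain ⟨hp2, hc2⟩ := hg
    simp only [List.any_eq_true]
    constructor
    · rintro ⟨i, hi, j, hj, hbody⟩
      rw [PySem.List.mem_pyRange_one] at hi hj
      obtain ⟨hi0, hiP⟩ := hi
      obtain ⟨hij, hjP⟩ := hj
      split_ifs at hbody with hguard
      simp only [Bool.or_eq_true, decide_eq_true_eq, not_or, not_le] at hguard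
      obtain ⟨hiC, hjC⟩ := hguard
      have hj0 : (0:Int) ≤ j := by omega
      rw [PySem.List.pyGetD_of_nonneg _ _ hi0, PySem.List.pyGetD_of_nonneg _ _ hj0,
          PySem.List.pyGetD_of_nonneg _ _ hi0, PySem.List.pyGetD_of_nonneg _ _ hj0] at hbody
      have hiN : i.toNat < (prev_notes.zip curr_notes).length := by
        rw [List.length_zip]; omega
      have hjN : j.toNat < (prev_notes.zip curr_notes).length := by
        rw [List.length_zip]; omega
      have hiP' : i.toNat < prev_notes.length := by omega
      have hjP' : j.toNat < prev_notes.length := by omega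
      have hiC' : i.toNat < curr_notes.length := by omega
      have hjC' : j.toNat < curr_notes.length := by omega
      rw [List.getD_eq_getElem _ _ hiP', List.getD_eq_getElem _ _ hjP',
          List.getD_eq_getElem _ _ hiC', List.getD_eq_getElem _ _ hjC'] at hbody
      simp only [Bool.and_eq_true, beq_iff_eq, bne_iff_ne] at hbody
      refine ⟨(prev_notes.zip curr_notes)[i.toNat], List.getElem_mem _,
              (prev_notes.zip curr_notes)[j.toNat], List.getElem_mem _, ?_⟩
      rw [List.getElem_zip, List.getElem_zip]
      exact ⟨hbody.1.1.1, hbody.1.1.2, hbody.1.2, hbody.2⟩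
    · rintro ⟨a, ha, b, hb, hgood⟩
      obtain ⟨na, hna, rfl⟩ := List.mem_iff_getElem.mp ha
      obtain ⟨nb, hnb, rfl⟩ := List.mem_iff_getElem.mp hb
      have hmin : (prev_notes.zip curr_notes).length = min prev_notes.length curr_notes.length :=
        List.length_zip
      have hne : na ≠ nb := by
        intro h; subst h
        exact cpfGood_ne_fst hgood rfl
      -- order the two indices, swapping the roles if needed
      have main : ∀ (ia ib : Nat) (hia : ia < (prev_notes.zip curr_notes).length)
          (hib : ib < (prev_notes.zip curr_notes).length), ia < ib →
          cpfGood (prev_notes.zip curr_notes)[ia] (prev_notes.zip curr_notes)[ib] →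
          ∃ i ∈ PySem.List.pyRange 0 (prev_notes.length : Int) 1,
            ∃ j ∈ PySem.List.pyRange (i + 1) (prev_notes.length : Int) 1,
            (if ((curr_notes.length : Int) ≤ i || (curr_notes.length : Int) ≤ j) then false
             else
               PySem.Int.mod |PySem.List.pyGetD prev_notes j 0 - PySem.List.pyGetD prev_notes i 0| 12 == 7 &&
               PySem.Int.mod |PySem.List.pyGetD curr_notes j 0 - PySem.List.pyGetD curr_notes i 0| 12 == 7 &&
               (PySem.List.pyGetD prev_notes i 0 != PySem.List.pyGetD curr_notes i 0) &&
               (PySem.List.pyGetD prev_notes j 0 != PySem.List.pyGetD curr_notes j 0)) = true := by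
        intro ia ib hia hib hlt hgood2
        have hiP' : ia < prev_notes.length := by omega
        have hjP' : ib < prev_notes.length := by omega
        have hiC' : ia < curr_notes.length := by omega
        have hjC' : ib < curr_notes.length := by omega
        refine ⟨(ia : Int), ?_, (ib : Int), ?_, ?_⟩
        · rw [PySem.List.mem_pyRange_one]
          exact ⟨Int.natCast_nonneg ia, by exact_mod_cast hiP'⟩
        · rw [PySem.List.mem_pyRange_one]
          exact ⟨by omega, by exact_mod_cast hjP'⟩
        · rw [if_neg (by
            simp only [Bool.or_eq_true, decide_eq_true_eq, not_or, not_le]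
            exact ⟨by exact_mod_cast hiC', by exact_mod_cast hjC'⟩)]
          rw [List.getElem_zip, List.getElem_zip] at hgood2
          obtain ⟨g1, g2, g3, g4⟩ := hgood2
          simp only [PySem.List.pyGetD_natCast]
          rw [List.getD_eq_getElem _ _ hiP', List.getD_eq_getElem _ _ hjP',
              List.getD_eq_getElem _ _ hiC', List.getD_eq_getElem _ _ hjC']
          simp only [Bool.and_eq_true, beq_iff_eq, bne_iff_ne]
          exact ⟨⟨⟨g1, g2⟩, g3⟩, g4⟩
      rcases Nat.lt_or_ge na nb with h | h
      · exact main na nb hna hnb h hgood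
      · have h' : nb < na := by omega
        exact main nb na hnb hna h' (cpfGood_symm hgood)

lemma cpfBad_B (prev_notes curr_notes : List Int) :
    check_parallel_fifths_alt prev_notes curr_notes = true ↔ CpfBad (prev_notes.zip curr_notes) := by
  unfold check_parallel_fifths_alt
  have hmem : ∀ x, x ∈ PySem.List.sorted
      ((prev_notes.zip curr_notes).filter (fun pc => pc.1 != pc.2)) (fun pc => pc.1) false ↔
      x ∈ (prev_notes.zip curr_notes).filter (fun pc => pc.1 != pc.2) := by
    intro x; exact PySem.List.mem_sorted _ _ _ x
  rw [cpfLoop_iff _ (fun _ => False) _ _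
    (fun x hx => by
      have := (hmem x).mp hx
      exact bne_iff_ne.mp (List.mem_filter.mp this).2)
    (PySem.List.sorted_pairwise _ _)
    (fun a h => h.elim)
    (fun a h => h.elim)
    (cpfInv_empty _) (cpfInv_empty _)]
  rw [cpfBad2_iff_bad]
  constructor
  · rintro (⟨b, _, a, h, _⟩ | ⟨a, ha, b, hb, hg⟩)
    · exact h.elim
    · rw [hmem, List.mem_filter] at ha hb
      exact ⟨a, ha.1, b, hb.1, hg⟩
  · rintro ⟨a, ha, b, hb, hg⟩
    refine Or.inr ⟨a, ?_, b, ?_, hg⟩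
    · rw [hmem, List.mem_filter]; exact ⟨ha, bne_iff_ne.mpr hg.2.2.1⟩
    · rw [hmem, List.mem_filter]; exact ⟨hb, bne_iff_ne.mpr hg.2.2.2⟩

-- ===== VERDICT (by name: the statement is the Claim_ definition above) =====
theorem check_parallel_fifths_spec : Claim_equal_check_parallel_fifths := by
  intro prev_notes curr_notes _
  unfold Spec_check_parallel_fifths
  rw [Bool.eq_iff_iff, cpfBad_A, cpfBad_B]
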